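-- pv_equiv track=rewrite | github.com/Sudo-Ali-Dev/Check.io-Python-Missions | 2. List but not the least/Mission_19.py | create_zigzag
-- ===== SOURCE A (Python) =====
-- def create_zigzag(rows: int, cols: int, start: int = 1) -> list[list[int]]:
--
--     result = []
--
--     i = 0
--     while i < rows: # This creates rows.
--         result_temp = [] # Saves array of the following iteration
--         j = 0
--         if i % 2 == 0: # checks if i is even or odd.
--             while j < cols: # This creates columns
--                 result_temp.append(start) # adds value of start to result temp.
--                 start += 1 # Adds one after each iteration to the start
--                 j += 1
--         else:
--             new_start = (start - 1) + cols # to reverse the order, this deduct one from start as the last value of start is always one more then required.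
--             start = start + cols # this makes sure that start is updated for the next normal order iteration
--             while j < cols:
--                 result_temp.append(new_start)
--                 new_start -= 1
--                 j += 1
--         result.append(result_temp) # adds value to the result variable outside of the loops
--         i += 1
--
--     return result
-- ===== SOURCE B (Python) =====
-- def create_zigzag(rows: int, cols: int, start: int = 1) -> list[list[int]]:
--     # Each row is one range object with closed-form endpoints derived from the row
--     # index (lo = start + i*cols): ascending for even rows, negative-step for odd
--     # rows. No running counter, no per-element Python loop, no reversal pass.
--     return [list(range(start + i * cols, start + (i + 1) * cols)) if i % 2 == 0
--             else list(range(start + (i + 1) * cols - 1, start + i * cols - 1, -1))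
--             for i in range(rows)]
-- ===== Notes on version B (the rewrite author's own statement) =====
-- stated objective: simpler
-- what changed: Replaces A's stateful while-loops (running start counter plus odd-row new_start countdown) by a single comprehension where each row is one range object with closed-form endpoints computed from the row index — ascending range for even rows, negative-step range for odd rows — so there is no running counter, no per-element Python loop and no reversal.
import Mathlib
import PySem

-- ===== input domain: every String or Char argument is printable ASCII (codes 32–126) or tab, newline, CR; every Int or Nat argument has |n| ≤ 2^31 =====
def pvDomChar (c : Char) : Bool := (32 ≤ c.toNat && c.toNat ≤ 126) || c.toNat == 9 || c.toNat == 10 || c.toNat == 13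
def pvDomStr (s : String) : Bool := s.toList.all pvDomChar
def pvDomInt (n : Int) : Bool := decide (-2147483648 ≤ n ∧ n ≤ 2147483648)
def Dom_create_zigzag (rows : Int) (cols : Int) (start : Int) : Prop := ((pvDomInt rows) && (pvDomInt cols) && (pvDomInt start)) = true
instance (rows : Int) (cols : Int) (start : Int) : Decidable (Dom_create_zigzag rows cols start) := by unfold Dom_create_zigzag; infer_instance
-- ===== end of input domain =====

-- B builds each row as one range with closed-form endpoints derived from the row
-- index (ascending for even rows, step -1 for odd rows): no running counter,
-- no reversal; objective: simpler.

-- ===== PORT A =====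
-- inner even-branch while loop: appends start, start+1, …; returns (result_temp, final start)
def pvEvenRow : Nat → Int → List Int → List Int × Int
  | 0, start, acc => (acc, start)
  | j+1, start, acc => pvEvenRow j (start + 1) (acc ++ [start])

-- inner odd-branch while loop: appends new_start, new_start-1, …
def pvOddRow : Nat → Int → List Int → List Int
  | 0, _, acc => acc
  | j+1, ns, acc => pvOddRow j (ns - 1) (acc ++ [ns])

-- outer while loop; fuel = number of remaining iterations, i is the Python counter
def pvZigLoop : Nat → Int → Int → Int → List (List Int) → List (List Int)
  | 0, _, _, _, acc => acc
  | n+1, i, cols, start, acc =>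
      if i % 2 = 0 then
        let p := pvEvenRow cols.toNat start []
        pvZigLoop n (i + 1) cols p.2 (acc ++ [p.1])
      else
        let row := pvOddRow cols.toNat (start - 1 + cols) []
        pvZigLoop n (i + 1) cols (start + cols) (acc ++ [row])

def create_zigzag (rows : Int) (cols : Int) (start : Int) : List (List Int) :=
  pvZigLoop rows.toNat 0 cols start []

-- ===== PORT B =====
def create_zigzag_alt (rows : Int) (cols : Int) (start : Int) : List (List Int) :=
  (List.range rows.toNat).map (fun (i : Nat) =>
    if i % 2 = 0 then
      PySem.List.pyRange (start + (i : Int) * cols) (start + ((i : Int) + 1) * cols) 1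
    else
      PySem.List.pyRange (start + ((i : Int) + 1) * cols - 1) (start + (i : Int) * cols - 1) (-1))

-- ===== PRECONDITION & SPEC =====
def Spec_create_zigzag (rows : Int) (cols : Int) (start : Int) (out : List (List Int)) : Prop := out = create_zigzag_alt rows cols start
instance (rows : Int) (cols : Int) (start : Int) (out : List (List Int)) : Decidable (Spec_create_zigzag rows cols start out) := by unfold Spec_create_zigzag; infer_instance

-- ===== CLAIM (what is proved, stated in full; the proofs are below) =====
def Claim_equal_create_zigzag : Prop := ∀ (rows : Int) (cols : Int) (start : Int), Dom_create_zigzag rows cols start → Spec_create_zigzag rows cols start (create_zigzag rows cols start)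

-- ===== LEMMAS AND PROOFS =====

theorem pvMapExt {α β : Type} (l : List α) (f g : α → β) (h : ∀ a, f a = g a) :
    l.map f = l.map g := List.map_congr_left (fun a _ => h a)

theorem pvEvenRow_eq (n : Nat) : ∀ (s : Int) (acc : List Int),
    pvEvenRow n s acc = (acc ++ (List.range n).map (fun (k : Nat) => s + (k : Int)), s + n) := by
  induction n with
  | zero => intro s acc; simp [pvEvenRow]
  | succ n ih =>
      intro s acc
      have ht : (List.range n).map (fun (k : Nat) => s + 1 + (k : Int))
          = (List.range n).map ((fun (k : Nat) => s + (k : Int)) ∘ Nat.succ) :=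
        pvMapExt _ _ _ (fun k => by simp only [Function.comp_apply]; push_cast; ring)
      rw [pvEvenRow, ih, ht, List.range_succ_eq_map, List.map_cons, List.map_map,
        List.append_assoc, List.singleton_append]
      exact Prod.ext (by simp) (by push_cast; ring)

theorem pvOddRow_eq (n : Nat) : ∀ (ns : Int) (acc : List Int),
    pvOddRow n ns acc = acc ++ (List.range n).map (fun (k : Nat) => ns - (k : Int)) := by
  induction n with
  | zero => intro ns acc; simp [pvOddRow]
  | succ n ih =>
      intro ns acc
      have ht : (List.range n).map (fun (k : Nat) => ns - 1 - (k : Int))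
          = (List.range n).map ((fun (k : Nat) => ns - (k : Int)) ∘ Nat.succ) :=
        pvMapExt _ _ _ (fun k => by simp only [Function.comp_apply]; push_cast; ring)
      rw [pvOddRow, ih, ht, List.range_succ_eq_map, List.map_cons, List.map_map,
        List.append_assoc, List.singleton_append]
      simp

-- the row B builds at index i when its leading offset is s (= start + i*cols)
def pvRowAt (cols : Int) (i : Nat) (s : Int) : List Int :=
  if i % 2 = 0 then PySem.List.pyRange s (s + cols) 1
  else PySem.List.pyRange (s + cols - 1) (s - 1) (-1)

theorem pvZigLoop_pos (cols : Int) (hc : 0 < cols) (n : Nat) :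
    ∀ (m : Nat) (s : Int) (acc : List (List Int)),
      pvZigLoop n (m : Int) cols s acc
        = acc ++ (List.range n).map (fun (j : Nat) => pvRowAt cols (m + j) (s + (j : Int) * cols)) := by
  induction n with
  | zero => intro m s acc; simp [pvZigLoop]
  | succ n ih =>
      intro m s acc
      have hct : ((cols.toNat : Int)) = cols := Int.toNat_of_nonneg hc.le
      have hcast : ((m : Int) + 1) = ((m + 1 : Nat) : Int) := by push_cast; ring
      by_cases hm : m % 2 = 0
      · have hmi : (m : Int) % 2 = 0 := by omega
        simp only [pvZigLoop, if_pos hmi, pvEvenRow_eq, List.nil_append]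
        rw [hcast, ih, List.range_succ_eq_map, List.map_cons, List.map_map,
          List.append_assoc, List.singleton_append]
        congr 1
        congr 1
        · simp only [pvRowAt, Nat.cast_zero, zero_mul, add_zero]
          rw [if_pos (by omega), PySem.List.pyRange_one]
          have : (s + cols - s).toNat = cols.toNat := by omega
          rw [this]
        · refine pvMapExt _ _ _ (fun j => ?_)
          simp only [Function.comp_apply]
          have e1 : m + 1 + j = m + (j + 1) := by omega
          rw [e1]
          congr 1
          rw [hct]; push_cast; ring
      · have hmi : ¬ ((m : Int) % 2 = 0) := by omega
        simp only [pvZigLoop, if_neg hmi, pvOddRow_eq, List.nil_append]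
        rw [hcast, ih, List.range_succ_eq_map, List.map_cons, List.map_map,
          List.append_assoc, List.singleton_append]
        congr 1
        congr 1
        · simp only [pvRowAt, Nat.cast_zero, zero_mul, add_zero]
          rw [if_neg (by omega), PySem.List.pyRange_neg_one]
          have : (s + cols - 1 - (s - 1)).toNat = cols.toNat := by omega
          rw [this]
          exact pvMapExt _ _ _ (fun k => by ring)
        · refine pvMapExt _ _ _ (fun j => ?_)
          simp only [Function.comp_apply]
          have e1 : m + 1 + j = m + (j + 1) := by omega
          rw [e1]
          congr 1
          push_cast; ring

theorem pvZigLoop_nonpos (cols : Int) (hc : cols ≤ 0) (n : Nat) :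
    ∀ (i s : Int) (acc : List (List Int)),
      pvZigLoop n i cols s acc = acc ++ List.replicate n [] := by
  induction n with
  | zero => intro i s acc; simp [pvZigLoop]
  | succ n ih =>
      intro i s acc
      have hct : cols.toNat = 0 := by omega
      by_cases hi : i % 2 = 0
      · simp only [pvZigLoop, if_pos hi, hct, pvEvenRow_eq, List.range_zero,
          List.map_nil, List.append_nil]
        rw [ih]
        simp [List.replicate_succ]
      · simp only [pvZigLoop, if_neg hi, hct, pvOddRow]
        rw [ih]
        simp [List.replicate_succ]

theorem pvRange_map_nil (n : Nat) :
    (List.range n).map (fun (_ : Nat) => ([] : List Int)) = List.replicate n [] := by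
  induction n with
  | zero => simp
  | succ n ih => rw [List.range_succ, List.map_append, ih]; simp [List.replicate_succ']

-- ===== VERDICT (by name: the statement is the Claim_ definition above) =====
theorem create_zigzag_spec : Claim_equal_create_zigzag := by
  intro rows cols start _
  unfold Spec_create_zigzag create_zigzag create_zigzag_alt
  by_cases hc : 0 < cols
  · have h0 : (0 : Int) = ((0 : Nat) : Int) := rfl
    rw [h0, pvZigLoop_pos cols hc, List.nil_append]
    refine pvMapExt _ _ _ (fun i => ?_)
    simp only [pvRowAt, Nat.zero_add]
    by_cases hi : i % 2 = 0
    · rw [if_pos hi, if_pos hi]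
      congr 1
      ring
    · rw [if_neg hi, if_neg hi]
      congr 1
      ring
  · have hc : cols ≤ 0 := by omega
    have hct : cols.toNat = 0 := by omega
    rw [pvZigLoop_nonpos cols hc, List.nil_append]
    refine ((pvMapExt _ _ _ (fun i => ?_)).trans (pvRange_map_nil rows.toNat)).symm
    by_cases hi : i % 2 = 0
    · rw [if_pos hi]
      refine PySem.List.pyRange_one_eq_nil ?_
      have he : start + ((i : Int) + 1) * cols = start + (i : Int) * cols + cols := by ring
      rw [he]; omega
    · rw [if_neg hi]
      refine PySem.List.pyRange_neg_one_eq_nil ?_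
      have he : start + ((i : Int) + 1) * cols - 1 = start + (i : Int) * cols - 1 + cols := by ring
      rw [he]; omega
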